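-- pv_equiv track=rewrite | github.com/romeorizzi/temi_prog_public | 2018.12.05.provetta/all-CMS-submissions-2018-12-05/2018-12-05.13:03:31.190966.VR437373.rank_unrank_ABstrings.py | ABstring_of_len_and_rank
-- ===== SOURCE A (Python) =====
-- def ABstring_of_len_and_rank(length, r):
--     stringa=""
--     while(length>0):
--         if(r>0):
--             if(2**(length-1)<=r):
--                 stringa="B"+stringa
--                 r=r-2**(length-1)
--             else:
--                 stringa="A"+stringa
--             length=length-1
--         else:
--             length=0
--     return stringa
-- ===== SOURCE B (Python) =====
-- def ABstring_of_len_and_rank(length, r):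
--     if length <= 0 or r <= 0:
--         return ""
--     if r >> length:  # r >= 2**length: every greedy step takes a 'B'
--         return "B" * length
--     # lowest set bit of r: A stops early once its remainder hits 0,
--     # so the output covers bit positions k .. length-1 only
--     t, k = r, 0
--     while t % 2 == 0:
--         t //= 2
--         k += 1
--     return "".join("B" if (r >> i) & 1 else "A" for i in range(k, length))
-- ===== Notes on version B (the rewrite author's own statement) =====
-- stated objective: faster
-- what changed: Replaces A's prepend-and-subtract loop (a fresh 2**(length-1) big power and a string prepend per iteration, O(length^2)) by direct bit tests of r: detect the r>=2**length all-'B' case with one shift, find r's lowest set bit (where A's early stop lands), and emit bits k..length-1 left-to-right in one join.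
import Mathlib
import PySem

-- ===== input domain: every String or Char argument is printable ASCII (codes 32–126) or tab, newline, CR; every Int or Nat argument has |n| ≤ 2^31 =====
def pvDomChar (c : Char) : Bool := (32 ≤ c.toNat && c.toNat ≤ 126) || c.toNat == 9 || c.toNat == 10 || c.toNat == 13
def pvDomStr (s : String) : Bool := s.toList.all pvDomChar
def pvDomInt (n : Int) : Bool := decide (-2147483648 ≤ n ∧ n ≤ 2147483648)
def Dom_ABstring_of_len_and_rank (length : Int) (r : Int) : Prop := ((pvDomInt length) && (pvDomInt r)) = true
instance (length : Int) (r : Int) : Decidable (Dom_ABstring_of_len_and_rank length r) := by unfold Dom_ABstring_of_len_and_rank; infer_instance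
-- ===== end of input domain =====

-- B replaces A's prepend-and-subtract loop (a fresh 2**(length-1) power each step) by
-- direct bit tests of r emitted left-to-right in one pass (objective: faster).


-- ===== PORT A =====
-- A's while-loop; the string is kept as a List Char (PySem convention), "B"+stringa is 'B' :: stringa.
def pvLoopA (length : Int) (r : Int) (stringa : List Char) : List Char :=
  if length > 0 then
    if r > 0 then
      if (2:Int) ^ (length - 1).toNat ≤ r then
        pvLoopA (length - 1) (r - (2:Int) ^ (length - 1).toNat) ('B' :: stringa)
      else
        pvLoopA (length - 1) r ('A' :: stringa)
    else stringa   -- length = 0; the loop then exits returning stringa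
  else stringa
termination_by length.toNat
decreasing_by all_goals omega

def ABstring_of_len_and_rank (length : Int) (r : Int) : String :=
  String.ofList (pvLoopA length r [])

-- ===== PORT B =====
-- Source B's trailing-zero loop: t, k = r, 0; while t % 2 == 0: t //= 2; k += 1
def pvTzLoop (t : Int) (k : Nat) : Nat :=
  if PySem.Int.mod t 2 = 0 then
    if _h : t ≤ 0 then k   -- totality guard only; B calls this with t > 0, where t % 2 == 0 forces t ≥ 2
    else pvTzLoop (PySem.Int.floordiv t 2) (k + 1)
  else k
termination_by t.toNat
decreasing_by
  rw [PySem.Int.floordiv_eq_ediv_of_pos (by omega)]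
  omega

def ABstring_of_len_and_rank_alt (length : Int) (r : Int) : String :=
  if length ≤ 0 ∨ r ≤ 0 then ""
  else if r >>> length.toNat ≠ 0 then        -- r >> length is truthy: r >= 2**length
    String.ofList (List.replicate length.toNat 'B')
  else
    let k := pvTzLoop r 0
    String.ofList ((List.range' k (length.toNat - k)).map
      (fun i => if PySem.Int.band (r >>> i) 1 = 1 then 'B' else 'A'))

-- ===== PRECONDITION & SPEC =====
def Spec_ABstring_of_len_and_rank (length : Int) (r : Int) (out : String) : Prop := out = ABstring_of_len_and_rank_alt length r
instance (length : Int) (r : Int) (out : String) : Decidable (Spec_ABstring_of_len_and_rank length r out) := by unfold Spec_ABstring_of_len_and_rank; infer_instance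

-- ===== CLAIM (what is proved, stated in full; the proofs are below) =====
def Claim_equal_ABstring_of_len_and_rank : Prop := ∀ (length : Int) (r : Int), Dom_ABstring_of_len_and_rank length r → Spec_ABstring_of_len_and_rank length r (ABstring_of_len_and_rank length r)

-- ===== LEMMAS AND PROOFS =====

-- the bit of n at position i, as the character the loops emit
def pvBitc (n : Nat) (i : Nat) : Char := if n / 2 ^ i % 2 = 1 then 'B' else 'A'

lemma pvLoopA_nonpos (length : Int) (r : Int) (acc : List Char) (hr : r ≤ 0) :
    pvLoopA length r acc = acc := by
  rw [pvLoopA]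
  split_ifs with h1 h2 <;> first | rfl | omega

lemma pvLoopA_acc_aux (L : Nat) : ∀ (length r : Int) (acc : List Char), length.toNat ≤ L →
    pvLoopA length r acc = pvLoopA length r [] ++ acc := by
  induction L with
  | zero =>
    intro length r acc h
    rw [pvLoopA]; conv_rhs => rw [pvLoopA]
    split_ifs <;> first | omega | simp
  | succ L ih =>
    intro length r acc h
    rw [pvLoopA]; conv_rhs => rw [pvLoopA]
    split_ifs with h1 h2 h3
    · rw [ih _ _ ('B' :: acc) (by omega), ih _ _ ('B' :: []) (by omega)]; simp
    · rw [ih _ _ ('A' :: acc) (by omega), ih _ _ ('A' :: []) (by omega)]; simp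
    · simp
    · simp

lemma pvLoopA_acc (length : Int) (r : Int) (acc : List Char) :
    pvLoopA length r acc = pvLoopA length r [] ++ acc :=
  pvLoopA_acc_aux length.toNat length r acc le_rfl

lemma pvLoopA_big (L : Nat) (r : Int) (h : (2:Int) ^ L ≤ r) :
    pvLoopA (L : Int) r [] = List.replicate L 'B' := by
  induction L generalizing r with
  | zero =>
    rw [pvLoopA]; simp
  | succ L ih =>
    have hpow : (0:Int) < 2 ^ L := by positivity
    have e1 : (((L+1 : Nat) : Int) - 1) = (L : Int) := by push_cast; ring
    rw [pvLoopA, if_pos (by exact_mod_cast Nat.succ_pos L), e1, Int.toNat_natCast]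
    have h2L : (2:Int) ^ (L+1) = 2 * 2 ^ L := by ring
    rw [if_pos (by omega), if_pos (by rw [h2L] at h; omega)]
    rw [pvLoopA_acc, ih _ (by rw [h2L] at h; omega)]
    simp [List.replicate_succ']

lemma pvBits_dvd (n : Nat) : ∀ (k : Nat), (∀ i < k, n / 2 ^ i % 2 = 0) → 2 ^ k ∣ n := by
  intro k
  induction k with
  | zero => intro _; simp
  | succ k ih =>
    intro h
    obtain ⟨m, hm⟩ := ih (fun i hi => h i (by omega))
    have hq : n / 2 ^ k = m := by rw [hm, Nat.mul_div_cancel_left _ (Nat.two_pow_pos k)]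
    have hb : m % 2 = 0 := by have := h k (by omega); omega
    obtain ⟨m', hm'⟩ : 2 ∣ m := by omega
    exact ⟨m', by rw [hm, hm', pow_succ]; ring⟩

lemma pvBit_add (m L i : Nat) (hi : i < L) : (m + 2 ^ L) / 2 ^ i % 2 = m / 2 ^ i % 2 := by
  have e : 2 ^ L = 2 ^ (L - i) * 2 ^ i := by rw [← pow_add]; congr 1; omega
  rw [e, Nat.add_mul_div_right _ _ (Nat.two_pow_pos i)]
  have e2 : 2 ^ (L - i) = 2 * 2 ^ (L - i - 1) := by
    rw [← pow_succ']; congr 1; omega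
  omega

lemma pvLow_le (n k : Nat) (hk1 : n / 2 ^ k % 2 = 1) : 2 ^ k ≤ n := by
  by_contra h
  rw [Nat.div_eq_of_lt (by omega)] at hk1
  omega

lemma pvLoopA_bits (L : Nat) : ∀ (n k : Nat), 0 < n → n < 2 ^ L →
    n / 2 ^ k % 2 = 1 → (∀ i < k, n / 2 ^ i % 2 = 0) →
    pvLoopA (L : Int) (n : Int) [] = (List.range' k (L - k)).map (pvBitc n) := by
  induction L with
  | zero => intro n k hn hL _ _; simp at hL; omega
  | succ L ih =>
    intro n k hn hL hk1 hk0
    have hkn : 2 ^ k ≤ n := pvLow_le n k hk1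
    have hk_le : k ≤ L := by
      by_contra hgt
      have : 2 ^ (L + 1) ≤ 2 ^ k := Nat.pow_le_pow_right (by omega) (by omega)
      omega
    have h2L1 : 2 ^ (L + 1) = 2 * 2 ^ L := by ring
    have e1 : (((L + 1 : Nat) : Int) - 1) = (L : Int) := by push_cast; ring
    rw [pvLoopA, if_pos (by exact_mod_cast Nat.succ_pos L), if_pos (by exact_mod_cast hn),
        e1, Int.toNat_natCast]
    by_cases hb : 2 ^ L ≤ n
    · -- bit L of n is 1: take the 'B' branch and subtract 2^L
      have hbitL : n / 2 ^ L % 2 = 1 := by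
        have h1 : n / 2 ^ L = 1 :=
          Nat.div_eq_of_lt_le (by omega : 1 * 2 ^ L ≤ n) (by omega : n < (1 + 1) * 2 ^ L)
        omega
      rw [if_pos (by exact_mod_cast hb)]
      have hm : (n : Int) - 2 ^ L = ((n - 2 ^ L : Nat) : Int) := by push_cast [hb]; ring
      rw [hm, pvLoopA_acc]
      set m := n - 2 ^ L with hmdef
      have hrange : List.range' k (L + 1 - k) = List.range' k (L - k) ++ [L] := by
        have : L + 1 - k = (L - k) + 1 := by omega
        rw [this, List.range'_1_concat]
        congr 2
        omega
      by_cases hm0 : m = 0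
      · -- n = 2^L exactly: the loop stops with r = 0 after this step
        have hneq : n = 2 ^ L := by omega
        have hkeq : k = L := by
          by_contra hne
          have hklt : k < L := lt_of_le_of_ne hk_le hne
          have : n / 2 ^ k = 2 ^ (L - k) := by
            rw [hneq, Nat.pow_div (by omega) (by omega)]
          have he : 2 ^ (L - k) = 2 * 2 ^ (L - k - 1) := by
            rw [← pow_succ']; congr 1; omega
          omega
        rw [hm0, hkeq]
        simp only [Nat.cast_zero, pvLoopA_nonpos _ _ _ (le_refl 0), List.nil_append]
        have : L + 1 - L = 1 := by omega
        rw [this, List.range'_one]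
        simp [pvBitc, hbitL]
      · -- m > 0: recurse; bits of m below L are exactly the bits of n
        have hmlt : m < 2 ^ L := by omega
        have hklt : k < L := by
          by_contra hne
          have hkeq : k = L := by omega
          have hdvd := pvBits_dvd n L (fun i hi => hk0 i (by omega))
          obtain ⟨c, hc⟩ := hdvd
          have hlt : 2 ^ L * c < 2 ^ L * 2 := by omega
          have : c < 2 := Nat.lt_of_mul_lt_mul_left hlt
          interval_cases c <;> omega
        have mi : ∀ i < L, m / 2 ^ i % 2 = n / 2 ^ i % 2 := by
          intro i hi
          have := pvBit_add m L i hi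
          have hmn : m + 2 ^ L = n := by omega
          rw [hmn] at this
          omega
        rw [ih m k (by omega) hmlt (by rw [mi k hklt]; exact hk1)
            (fun i hi => by rw [mi i (by omega)]; exact hk0 i hi)]
        rw [hrange, List.map_append]
        congr 1
        · apply List.map_congr_left
          intro x hx
          have hxL : x < L := by
            have := List.mem_range'_1.mp hx
            omega
          simp only [pvBitc, mi x hxL]
        · simp [pvBitc, hbitL]
    · -- bit L of n is 0: take the 'A' branch
      have hbitL : n / 2 ^ L = 0 := Nat.div_eq_of_lt (by omega)
      have hbi : ¬ ((2:Int) ^ L ≤ (n : Int)) := by exact_mod_cast hb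
      rw [if_neg hbi, pvLoopA_acc]
      have hklt : k < L := by
        have h2 : 2 ^ k < 2 ^ L := lt_of_le_of_lt hkn (not_le.mp hb)
        exact (Nat.pow_lt_pow_iff_right (by omega)).mp h2
      rw [ih n k hn (by omega) hk1 hk0]
      have hrange : List.range' k (L + 1 - k) = List.range' k (L - k) ++ [L] := by
        have : L + 1 - k = (L - k) + 1 := by omega
        rw [this, List.range'_1_concat]
        congr 2
        omega
      rw [hrange, List.map_append]
      congr 1
      simp [pvBitc, hbitL]

lemma pvTzLoop_cast (n : Nat) (k : Nat) :
    pvTzLoop (n : Int) k = if n % 2 = 0 then (if n = 0 then k else pvTzLoop ((n / 2 : Nat) : Int) (k + 1)) else k := by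
  rw [pvTzLoop]
  have hm : PySem.Int.mod (n : Int) 2 = ((n % 2 : Nat) : Int) := by
    exact_mod_cast PySem.Int.mod_natCast n 2
  have hd : PySem.Int.floordiv (n : Int) 2 = ((n / 2 : Nat) : Int) := by
    exact_mod_cast PySem.Int.floordiv_natCast n 2
  rw [hm, hd]
  by_cases h0 : n % 2 = 0 <;> by_cases h1 : n = 0 <;> simp [h0, h1] <;> omega

lemma pvTzLoop_shift (n : Nat) : ∀ (k : Nat), pvTzLoop (n : Int) k = k + pvTzLoop (n : Int) 0 := by
  induction n using Nat.strong_induction_on with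
  | _ n ih =>
    intro k
    by_cases h0 : n % 2 = 0
    · by_cases h1 : n = 0
      · conv_lhs => rw [pvTzLoop_cast]
        conv_rhs => rw [pvTzLoop_cast]
        simp [h1]
      · conv_lhs => rw [pvTzLoop_cast]
        conv_rhs => rw [pvTzLoop_cast]
        simp only [h0, h1, if_true, if_false]
        rw [ih (n / 2) (by omega) (k + 1), ih (n / 2) (by omega) 1]
        omega
    · conv_lhs => rw [pvTzLoop_cast]
      conv_rhs => rw [pvTzLoop_cast]
      simp [h0]

lemma pvTzLoop_bit_one (n : Nat) (hn : 0 < n) : n / 2 ^ (pvTzLoop (n : Int) 0) % 2 = 1 := by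
  induction n using Nat.strong_induction_on with
  | _ n ih =>
    by_cases h0 : n % 2 = 0
    · rw [pvTzLoop_cast]
      simp only [h0, if_true]
      rw [if_neg (by omega), pvTzLoop_shift]
      have hdd : n / 2 ^ (1 + pvTzLoop ((n/2 : Nat) : Int) 0) = (n / 2) / 2 ^ (pvTzLoop ((n/2 : Nat) : Int) 0) := by
        rw [pow_add, pow_one, Nat.div_div_eq_div_mul]
      rw [hdd]
      exact ih (n / 2) (by omega) (by omega)
    · rw [pvTzLoop_cast]
      simp [h0]
      omega

lemma pvTzLoop_bit_zero (n : Nat) (hn : 0 < n) :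
    ∀ i < pvTzLoop (n : Int) 0, n / 2 ^ i % 2 = 0 := by
  induction n using Nat.strong_induction_on with
  | _ n ih =>
    intro i hi
    by_cases h0 : n % 2 = 0
    · rw [pvTzLoop_cast] at hi
      simp only [h0, if_true] at hi
      rw [if_neg (by omega), pvTzLoop_shift] at hi
      match i with
      | 0 => simpa using h0
      | (j+1) =>
        have hdd : n / 2 ^ (j + 1) = (n / 2) / 2 ^ j := by
          rw [pow_succ, Nat.div_div_eq_div_mul]; ring_nf
        rw [hdd]
        exact ih (n / 2) (by omega) (by omega) j (by omega)
    · rw [pvTzLoop_cast] at hi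
      simp [h0] at hi

-- B's character test '(r >> i) & 1' is the bit of n = r.toNat at position i
lemma pvBchar (n i : Nat) :
    (if PySem.Int.band ((n : Int) >>> ((i : Nat) : Int)) 1 = 1 then 'B' else 'A') = pvBitc n i := by
  rw [Int.shiftRight_natCast, PySem.Int.band_one]
  have hm : PySem.Int.mod ((n >>> i : Nat) : Int) 2 = (((n >>> i) % 2 : Nat) : Int) := by
    exact_mod_cast PySem.Int.mod_natCast (n >>> i) 2
  rw [hm, Nat.shiftRight_eq_div_pow]
  unfold pvBitc
  by_cases h : n / 2 ^ i % 2 = 1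
  · simp [h]
  · rw [if_neg h, if_neg (by exact_mod_cast h)]

-- ===== VERDICT (by name: the statement is the Claim_ definition above) =====
theorem ABstring_of_len_and_rank_spec : Claim_equal_ABstring_of_len_and_rank := by
  intro length r _
  unfold Spec_ABstring_of_len_and_rank ABstring_of_len_and_rank ABstring_of_len_and_rank_alt
  by_cases hneg : length ≤ 0 ∨ r ≤ 0
  · rw [if_pos hneg]
    rcases hneg with h | h
    · rw [pvLoopA, if_neg (by omega)]
    · rw [pvLoopA_nonpos _ _ _ h]
  · push Not at hneg
    obtain ⟨hL0, hr0⟩ := hneg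
    obtain ⟨L, rfl⟩ : ∃ L : Nat, length = (L : Int) :=
      ⟨length.toNat, (Int.toNat_of_nonneg (by omega)).symm⟩
    obtain ⟨n, rfl⟩ : ∃ n : Nat, r = (n : Int) :=
      ⟨r.toNat, (Int.toNat_of_nonneg (by omega)).symm⟩
    have hLpos : 0 < L := by exact_mod_cast hL0
    have hnpos : 0 < n := by exact_mod_cast hr0
    rw [if_neg (by omega)]
    simp only [Int.toNat_natCast, ← Int.natCast_shiftRight]
    by_cases hbig : 2 ^ L ≤ n
    · have hne : ((n >>> L : Nat) : Int) ≠ 0 := by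
        have h1 : 1 ≤ n / 2 ^ L := (Nat.one_le_div_iff (Nat.two_pow_pos L)).mpr hbig
        rw [Nat.shiftRight_eq_div_pow]
        exact Nat.cast_ne_zero.mpr (Nat.one_le_iff_ne_zero.mp h1)
      rw [if_pos hne, pvLoopA_big L (n : Int) (by exact_mod_cast hbig)]
    · have heq : ((n >>> L : Nat) : Int) = 0 := by
        rw [Nat.shiftRight_eq_div_pow, Nat.div_eq_of_lt (by omega)]
        rfl
      rw [if_neg (by simp [heq])]
      have hlt : n < 2 ^ L := by omega
      rw [pvLoopA_bits L n (pvTzLoop (n : Int) 0) hnpos hlt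
        (pvTzLoop_bit_one n hnpos) (pvTzLoop_bit_zero n hnpos)]
      congr 1
      simp only [List.pure_def, List.bind_eq_flatMap, List.map_flatMap, List.map_singleton]
      rw [← List.map_eq_flatMap]
      apply List.map_congr_left
      intro x _
      exact (pvBchar n x).symm
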